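-- pv_equiv track=rewrite | github.com/kimmoses187-del/alpha-agents | agents/base_agent.py | extract_signal
-- ===== SOURCE A (Python) =====
-- def extract_signal(text: str, risk_profile: str = "risk-averse") -> str:
--     """Extract BUY or SELL from the LLM response.
--
--     Scans from the bottom up to catch the final RECOMMENDATION line first.
--     Tie-break: risk-averse defaults to SELL; risk-neutral defaults to BUY.
--     """
--     for line in reversed(text.splitlines()):
--         upper = line.upper().strip()
--         if "SELL" in upper:
--             return "SELL"
--         if "BUY" in upper:
--             return "BUY"
--     # Whole-text fallback: count occurrences
--     upper_text = text.upper()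
--     sell_count = upper_text.count("SELL")
--     buy_count  = upper_text.count("BUY")
--     if sell_count != buy_count:
--         return "SELL" if sell_count > buy_count else "BUY"
--     # True tie — use profile default
--     return "SELL" if risk_profile == "risk-averse" else "BUY"
-- ===== SOURCE B (Python) =====
-- def extract_signal(text: str, risk_profile: str = "risk-averse") -> str:
--     """Decide by comparing the positions of the last SELL line and the last BUY line.
--
--     Two staged passes compute the greatest line index containing each token
--     (after uppercasing/stripping); the later one wins, SELL winning ties.
--     """
--     lines = [line.upper().strip() for line in text.splitlines()]
--     last_sell = max((i for i, line in enumerate(lines) if "SELL" in line), default=-1)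
--     last_buy = max((i for i, line in enumerate(lines) if "BUY" in line), default=-1)
--     if last_sell == -1 and last_buy == -1:
--         return "SELL" if risk_profile == "risk-averse" else "BUY"
--     return "SELL" if last_sell >= last_buy else "BUY"
-- ===== Notes on version B (the rewrite author's own statement) =====
-- stated objective: alternative
-- what changed: Replaces A's bottom-up early-return line scan (plus a provably dead whole-text count fallback) by two staged passes that compute the last line index containing SELL and the last containing BUY and decide by comparing the two indices (SELL winning ties).
import Mathlib
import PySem

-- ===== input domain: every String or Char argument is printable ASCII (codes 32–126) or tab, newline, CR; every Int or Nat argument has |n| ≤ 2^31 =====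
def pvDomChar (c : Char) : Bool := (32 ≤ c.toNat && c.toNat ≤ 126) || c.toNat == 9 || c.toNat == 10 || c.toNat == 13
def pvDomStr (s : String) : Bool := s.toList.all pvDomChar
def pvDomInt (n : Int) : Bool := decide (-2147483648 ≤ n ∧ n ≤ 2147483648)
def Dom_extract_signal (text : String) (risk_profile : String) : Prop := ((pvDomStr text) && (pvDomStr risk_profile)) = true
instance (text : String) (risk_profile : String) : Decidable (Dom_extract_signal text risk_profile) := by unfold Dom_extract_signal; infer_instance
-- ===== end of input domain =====

-- B decides by comparing the last SELL-line index with the last BUY-line index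
-- (two staged passes) instead of A's bottom-up early-return scan; A's whole-text
-- count fallback is dead (both counts are zero when the scan finds nothing).

-- ===== PORT A =====
-- the 'for line in reversed(text.splitlines())' loop with early return
def aScan : List String → Option String
  | [] => none
  | line :: rest =>
    let upper := PySem.Str.strip (PySem.Str.upper line)
    if PySem.Str.isIn "SELL" upper then some "SELL"
    else if PySem.Str.isIn "BUY" upper then some "BUY"
    else aScan rest

def extract_signal (text : String) (risk_profile : String) : String :=
  match aScan (PySem.Str.splitlines text).reverse with
  | some s => s
  | none =>
    let upper_text := PySem.Str.upper text
    let sell_count := PySem.Str.count upper_text "SELL"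
    let buy_count := PySem.Str.count upper_text "BUY"
    if sell_count ≠ buy_count then
      (if sell_count > buy_count then "SELL" else "BUY")
    else
      (if risk_profile == "risk-averse" then "SELL" else "BUY")

-- ===== PORT B =====
-- max((i for i, line in enumerate(lines) if sub in line), default=-1)
def lastMatch (sub : String) (lines : List String) : Int :=
  ((PySem.List.enumerate lines 0).filter (fun p => PySem.Str.isIn sub p.2)).foldl
    (fun m q => max m q.1) (-1)

def extract_signal_alt (text : String) (risk_profile : String) : String :=
  let lines := (PySem.Str.splitlines text).map (fun l => PySem.Str.strip (PySem.Str.upper l))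
  let last_sell := lastMatch "SELL" lines
  let last_buy := lastMatch "BUY" lines
  if last_sell = -1 ∧ last_buy = -1 then
    (if risk_profile == "risk-averse" then "SELL" else "BUY")
  else if last_sell ≥ last_buy then "SELL" else "BUY"

-- ===== PRECONDITION & SPEC =====
def Spec_extract_signal (text : String) (risk_profile : String) (out : String) : Prop := out = extract_signal_alt text risk_profile
instance (text : String) (risk_profile : String) (out : String) : Decidable (Spec_extract_signal text risk_profile out) := by unfold Spec_extract_signal; infer_instance

-- ===== CLAIM (what is proved, stated in full; the proofs are below) =====
def Claim_equal_extract_signal : Prop := ∀ (text : String) (risk_profile : String), Dom_extract_signal text risk_profile → Spec_extract_signal text risk_profile (extract_signal text risk_profile)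

-- ===== LEMMAS AND PROOFS =====

-- ---- generic foldl-max facts ----

theorem foldl_max_lt (ps : List (Int × String)) (a n : Int)
    (ha : a < n) (hp : ∀ p ∈ ps, p.1 < n) :
    ps.foldl (fun m q => max m q.1) a < n := by
  induction ps generalizing a with
  | nil => simpa using ha
  | cons q ps ih =>
    exact ih _ (max_lt ha (hp q List.mem_cons_self))
      (fun p hp' => hp p (List.mem_cons_of_mem _ hp'))

theorem le_foldl_max_acc (ps : List (Int × String)) (a : Int) :
    a ≤ ps.foldl (fun m q => max m q.1) a := by
  induction ps generalizing a with
  | nil => simp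
  | cons q ps ih => exact le_trans (le_max_left _ _) (ih _)

theorem mem_le_foldl_max (ps : List (Int × String)) (a : Int) (p : Int × String) (hp : p ∈ ps) :
    p.1 ≤ ps.foldl (fun m q => max m q.1) a := by
  induction ps generalizing a with
  | nil => cases hp
  | cons q ps ih =>
    rcases List.mem_cons.mp hp with rfl | h
    · exact le_trans (le_max_right _ _) (le_foldl_max_acc _ _)
    · exact ih _ h

-- ---- lastMatch characterisation ----

theorem lastMatch_lt (sub : String) (u : List String) :
    lastMatch sub u < (u.length : Int) := by
  unfold lastMatch
  apply foldl_max_lt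
  · omega
  · intro p hp
    have hp' := List.mem_of_mem_filter hp
    rcases (PySem.List.mem_enumerate_iff u 0 p).mp hp' with ⟨k, hk, rfl⟩
    simp only [zero_add]
    omega

theorem lastMatch_append (sub : String) (u : List String) (x : String) :
    lastMatch sub (u ++ [x]) =
      if PySem.Str.isIn sub x then (u.length : Int) else lastMatch sub u := by
  unfold lastMatch
  rw [PySem.List.enumerate_append]
  have h1 : PySem.List.enumerate [x] (0 + (u.length : Int)) = [((u.length : Int), x)] := by
    rw [PySem.List.enumerate_cons, PySem.List.enumerate_nil]
    simp
  rw [h1, List.filter_append, List.foldl_append]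
  simp only [List.filter_cons, List.filter_nil]
  by_cases hx : PySem.Str.isIn sub x = true
  · simp only [hx, if_true, List.foldl_cons, List.foldl_nil]
    exact max_eq_right (le_of_lt (lastMatch_lt sub u))
  · simp only [hx, Bool.false_eq_true, if_false, List.foldl_nil]

theorem lastMatch_nonneg_of_mem (sub : String) (u : List String) (x : String)
    (hx : x ∈ u) (hm : PySem.Str.isIn sub x = true) :
    0 ≤ lastMatch sub u := by
  rcases List.mem_iff_getElem.mp hx with ⟨k, hk, rfl⟩
  have hpe : ((0 : Int) + (k : Int), u[k]) ∈ PySem.List.enumerate u 0 :=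
    (PySem.List.mem_enumerate_iff u 0 _).mpr ⟨k, hk, rfl⟩
  have hpf : ((0 : Int) + (k : Int), u[k]) ∈
      (PySem.List.enumerate u 0).filter (fun p => PySem.Str.isIn sub p.2) :=
    List.mem_filter.mpr ⟨hpe, by simpa using hm⟩
  have hle := mem_le_foldl_max _ (-1) _ hpf
  unfold lastMatch
  have h1 : (((0 : Int) + (k : Int), u[k]) : Int × String).1 = (0 : Int) + (k : Int) := rfl
  rw [h1] at hle
  omega

theorem lastMatch_eq_neg_one (sub : String) (u : List String)
    (h : lastMatch sub u = -1) :
    ∀ x ∈ u, PySem.Str.isIn sub x = false := by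
  intro x hx
  by_contra hb
  have hm : PySem.Str.isIn sub x = true := by
    cases hv : PySem.Str.isIn sub x
    · exact absurd hv hb
    · rfl
  have := lastMatch_nonneg_of_mem sub u x hx hm
  omega

-- ---- main scan lemma: A's reverse scan vs B's index comparison ----

theorem aScan_eq (l : List String) :
    aScan l.reverse =
      (if lastMatch "SELL" (l.map (fun s => PySem.Str.strip (PySem.Str.upper s))) = -1 ∧
          lastMatch "BUY" (l.map (fun s => PySem.Str.strip (PySem.Str.upper s))) = -1 then none
       else some (if lastMatch "SELL" (l.map (fun s => PySem.Str.strip (PySem.Str.upper s))) ≥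
                     lastMatch "BUY" (l.map (fun s => PySem.Str.strip (PySem.Str.upper s)))
                  then "SELL" else "BUY")) := by
  induction l using List.reverseRecOn with
  | nil =>
    simp [aScan, lastMatch, PySem.List.enumerate_nil]
  | append_singleton v x ih =>
    rw [List.reverse_append, List.map_append]
    simp only [List.map_cons, List.map_nil, List.reverse_cons, List.reverse_nil,
      List.nil_append, List.singleton_append, List.cons_append, lastMatch_append,
      List.length_map]
    have hlt : ∀ sub : String,
        lastMatch sub (v.map (fun s => PySem.Str.strip (PySem.Str.upper s))) < (v.length : Int) := by
      intro sub
      have := lastMatch_lt sub (v.map (fun s => PySem.Str.strip (PySem.Str.upper s)))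
      simpa using this
    show aScan (x :: v.reverse) = _
    simp only [aScan]
    by_cases hs : PySem.Str.isIn "SELL" (PySem.Str.strip (PySem.Str.upper x)) = true
    · simp only [hs, if_true]
      rw [if_neg (by
        push_neg
        intro h
        omega)]
      rw [if_pos (by
        show (if PySem.Str.isIn "BUY" (PySem.Str.strip (PySem.Str.upper x)) = true
            then (v.length : Int) else lastMatch "BUY" (v.map (fun s => PySem.Str.strip (PySem.Str.upper s)))) ≤ (v.length : Int)
        split_ifs with hb
        · exact le_refl _
        · exact le_of_lt (hlt "BUY"))]
    · by_cases hb : PySem.Str.isIn "BUY" (PySem.Str.strip (PySem.Str.upper x)) = true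
      · simp only [hs, hb, Bool.false_eq_true, if_true, if_false]
        rw [if_neg (by
          push_neg
          intro h
          omega)]
        rw [if_neg (by
          show ¬ ((v.length : Int) ≤ lastMatch "SELL" (v.map (fun s => PySem.Str.strip (PySem.Str.upper s))))
          push_neg
          exact hlt "SELL")]
      · simp only [hs, hb, Bool.false_eq_true, if_false]
        exact ih

-- ---- A's fallback is dead: positional lemmas about infix occurrences ----

theorem prefix_split (sub l1 l2 : List Char) (b : Char) (hb : b ∉ sub)
    (h : sub <+: l1 ++ b :: l2) : sub <+: l1 := by
  induction sub generalizing l1 with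
  | nil => simp
  | cons x xs ih =>
    cases l1 with
    | nil =>
      rcases h with ⟨t, ht⟩
      simp only [List.nil_append, List.cons_append, List.cons.injEq] at ht
      exact absurd ht.1 (by simp at hb; exact fun e => hb.1 e.symm)
    | cons y l1' =>
      rcases h with ⟨t, ht⟩
      simp only [List.cons_append, List.cons.injEq] at ht
      rcases ht with ⟨rfl, ht⟩
      have hb' : b ∉ xs := fun hm => hb (List.mem_cons_of_mem _ hm)
      exact List.cons_prefix_cons.mpr ⟨rfl, ih l1' hb' ⟨t, ht⟩⟩

theorem infix_split (sub l1 l2 : List Char) (b : Char) (hb : b ∉ sub)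
    (h : sub <:+: l1 ++ b :: l2) : sub <:+: l1 ∨ sub <:+: l2 := by
  rcases eq_or_ne sub [] with rfl | hne
  · exact Or.inl (List.nil_infix)
  induction l1 with
  | nil =>
    rcases h with ⟨s, t, hst⟩
    cases s with
    | nil =>
      exfalso
      cases sub with
      | nil => exact hne rfl
      | cons x xs =>
        simp only [List.nil_append, List.cons_append, List.cons.injEq] at hst
        exact hb (hst.1 ▸ List.mem_cons_self)
    | cons c s' =>
      simp only [List.nil_append, List.cons_append, List.cons.injEq] at hst
      exact Or.inr ⟨s', t, hst.2⟩
  | cons a l1' ih =>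
    rcases h with ⟨s, t, hst⟩
    cases s with
    | nil =>
      have hp : sub <+: (a :: l1') ++ b :: l2 := ⟨t, by simpa using hst⟩
      exact Or.inl (prefix_split sub (a :: l1') l2 b hb hp).isInfix
    | cons c s' =>
      simp only [List.cons_append, List.cons.injEq] at hst
      rcases ih ⟨s', t, hst.2⟩ with h' | h'
      · exact Or.inl (List.infix_cons h')
      · exact Or.inr h' 

-- dropping an all-P prefix keeps a ¬P-charactered infix
theorem infix_drop_left (P : Char → Bool) (sub p m : List Char)
    (hp : ∀ c ∈ p, P c = true) (hsub : ∀ c ∈ sub, P c = false) (hne : sub ≠ [])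
    (h : sub <:+: p ++ m) : sub <:+: m := by
  induction p with
  | nil => simpa using h
  | cons c p' ih =>
    rcases h with ⟨s, t, hst⟩
    cases s with
    | nil =>
      exfalso
      cases sub with
      | nil => exact hne rfl
      | cons x xs =>
        simp only [List.nil_append, List.cons_append, List.cons.injEq] at hst
        have hPx : P x = false := hsub x List.mem_cons_self
        have hPc : P c = true := hp c List.mem_cons_self
        rw [hst.1] at hPx
        simp [hPc] at hPx
    | cons c' s' =>
      simp only [List.cons_append, List.cons.injEq] at hst
      exact ih (fun d hd => hp d (List.mem_cons_of_mem _ hd)) ⟨s', t, hst.2⟩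

theorem infix_drop_right (P : Char → Bool) (sub m q : List Char)
    (hq : ∀ c ∈ q, P c = true) (hsub : ∀ c ∈ sub, P c = false) (hne : sub ≠ [])
    (h : sub <:+: m ++ q) : sub <:+: m := by
  have hrev : sub.reverse <:+: q.reverse ++ m.reverse := by
    rw [← List.reverse_append]
    exact List.reverse_infix.mpr h
  have := infix_drop_left P sub.reverse q.reverse m.reverse
    (fun c hc => hq c (List.mem_reverse.mp hc))
    (fun c hc => hsub c (List.mem_reverse.mp hc))
    (by simpa using hne) hrev
  rw [← List.reverse_infix]
  exact this

theorem infix_strip (sub u : List Char)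
    (hsub : ∀ c ∈ sub, PySem.Chars.isspace c = false) (hne : sub ≠ [])
    (h : sub <:+: u) : sub <:+: PySem.Chars.strip u := by
  have h1 : sub <:+: PySem.Chars.lstrip u := by
    apply infix_drop_left PySem.Chars.isspace sub
      (u.takeWhile PySem.Chars.isspace) _ (fun c hc => List.mem_takeWhile_imp hc) hsub hne
    rw [PySem.Chars.lstrip]
    rw [List.takeWhile_append_dropWhile]
    exact h
  set v := PySem.Chars.lstrip u with hv
  have hdecomp : v = PySem.Chars.rstrip v ++ (v.reverse.takeWhile PySem.Chars.isspace).reverse := by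
    rw [PySem.Chars.rstrip]
    conv_lhs => rw [← List.reverse_reverse v, ← List.takeWhile_append_dropWhile (p := PySem.Chars.isspace) (l := v.reverse)]
    rw [List.reverse_append]
  have := infix_drop_right PySem.Chars.isspace sub (PySem.Chars.rstrip v)
    ((v.reverse.takeWhile PySem.Chars.isspace).reverse)
    (fun c hc => List.mem_takeWhile_imp (List.mem_reverse.mp hc)) hsub hne
    (by rw [← hdecomp]; exact h1)
  exact this

theorem mem_splitlines_go_acc (isB : Char → Bool) (s cur : List Char)
    (acc : List (List Char)) (x : List Char) (hx : x ∈ acc) :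
    x ∈ PySem.Chars.splitlines.go isB s cur acc := by
  fun_induction PySem.Chars.splitlines.go isB s cur acc with
  | case1 cur acc hemp => simpa using hx
  | case2 cur acc hemp => simp only [List.mem_reverse] at hx ⊢; exact List.mem_cons_of_mem _ hx
  | case3 rest cur acc ih => exact ih (List.mem_cons_of_mem _ hx)
  | case4 c rest cur acc hnm hc ih => exact ih (List.mem_cons_of_mem _ hx)
  | case5 c rest cur acc hnm hc ih => exact ih hx

-- any break-free infix of the text is an infix of one of its splitlines
theorem infix_splitlines_go (isB : Char → Bool) (sub : List Char)
    (hsub : ∀ c ∈ sub, isB c = false) (hne : sub ≠ [])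
    (hr : isB '\r' = true) (hn : isB '\n' = true) :
    ∀ (s cur : List Char) (acc : List (List Char)),
      sub <:+: (cur.reverse ++ s) →
      ∃ line ∈ PySem.Chars.splitlines.go isB s cur acc, sub <:+: line := by
  intro s cur acc h
  have hbmem : ∀ b : Char, isB b = true → b ∉ sub := by
    intro b hbB hmem
    rw [hsub b hmem] at hbB
    exact Bool.false_ne_true hbB
  fun_induction PySem.Chars.splitlines.go isB s cur acc with
  | case1 cur acc hemp =>
    exfalso
    simp only [List.append_nil] at h
    rw [List.isEmpty_iff.mp hemp] at h
    simp only [List.reverse_nil] at h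
    exact hne (List.eq_nil_of_infix_nil h)
  | case2 cur acc hemp =>
    simp only [List.append_nil] at h
    exact ⟨cur.reverse, by simp, h⟩
  | case3 rest cur acc ih =>
    rcases infix_split sub cur.reverse ('\n' :: rest) '\x0d' (hbmem _ hr) h with h' | h'
    · exact ⟨cur.reverse, mem_splitlines_go_acc _ _ _ _ _ (List.mem_cons_self), h'⟩
    · rcases infix_split sub [] rest '\n' (hbmem _ hn) h' with h'' | h''
      · exact absurd (List.eq_nil_of_infix_nil h'') hne
      · exact ih (by simpa using h'')
  | case4 c rest cur acc hnm hc ih =>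
    rcases infix_split sub cur.reverse rest c (hbmem _ hc) h with h' | h'
    · exact ⟨cur.reverse, mem_splitlines_go_acc _ _ _ _ _ (List.mem_cons_self), h'⟩
    · exact ih (by simpa using h')
  | case5 c rest cur acc hnm hc ih =>
    exact ih (by simpa using h)

theorem infix_splitlines (sub t : List Char)
    (hsub : ∀ c ∈ sub, (decide (c.toNat = 10) || decide (c.toNat = 13) || decide (c.toNat = 11) ||
      decide (c.toNat = 12) || decide (c.toNat = 28) || decide (c.toNat = 29) ||
      decide (c.toNat = 30) || decide (c.toNat = 133) || decide (c.toNat = 8232) ||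
      decide (c.toNat = 8233)) = false)
    (hne : sub ≠ []) (h : sub <:+: t) :
    ∃ line ∈ PySem.Chars.splitlines t, sub <:+: line := by
  rw [PySem.Chars.splitlines]
  exact infix_splitlines_go _ sub (fun c hc => hsub c hc) hne rfl rfl t [] [] (by simpa using h)

-- an infix of map f t is the image of an infix of t
theorem infix_map_rev (f : Char → Char) (sub t : List Char) (h : sub <:+: t.map f) :
    ∃ u, u <:+: t ∧ u.map f = sub := by
  rcases h with ⟨s, e, hse⟩
  rw [List.append_assoc] at hse
  rcases List.map_eq_append_iff.mp hse.symm with ⟨t1, t23, ht, h1, h23⟩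
  rcases List.map_eq_append_iff.mp h23 with ⟨t2, t3, ht2, h2, h3⟩
  exact ⟨t2, ⟨t1, t3, by simp [ht, ht2]⟩, h2⟩

-- count is zero when there is no occurrence
theorem count_go_no_occ (sub : List Char) (fuel : Nat) (s : List Char) (acc : Nat)
    (h : ¬ sub <:+: s) : PySem.Chars.count.go sub fuel s acc = acc := by
  fun_induction PySem.Chars.count.go sub fuel s acc with
  | case1 s acc => rfl
  | case2 fuel acc hf => rfl
  | case3 fuel hd tl acc hp ih =>
    exact absurd (List.IsPrefix.isInfix (List.isPrefixOf_iff_prefix.mp hp)) h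
  | case4 fuel hd tl acc hp ih =>
    exact ih (fun h' => h (List.infix_cons h'))

theorem count_eq_zero (s sub : List Char) (hne : sub ≠ []) (h : ¬ sub <:+: s) :
    PySem.Chars.count s sub = 0 := by
  rw [PySem.Chars.count, if_neg (by simpa using hne)]
  exact count_go_no_occ sub s.length s 0 h

theorem upperChar_toNat (c u : Char) (h : PySem.Chars.upperChar c = u) :
    c.toNat = u.toNat ∨ (97 ≤ c.toNat ∧ c.toNat ≤ 122 ∧ c.toNat = u.toNat + 32) := by
  unfold PySem.Chars.upperChar PySem.Chars.islower at h
  split_ifs at h with hl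
  · right
    simp only [Bool.and_eq_true, decide_eq_true_eq] at hl
    obtain ⟨h1, h2⟩ := hl
    have h1' : 97 ≤ c.toNat := Nat.succ_le_of_lt h1
    have h2' : c.toNat ≤ 122 := UInt32.le_iff_toNat_le.mp (Char.le_def.mp h2)
    have hv : (c.toNat - 32).isValidChar := Or.inl (by omega)
    have := congrArg Char.toNat h
    rw [Char.toNat_ofNat, if_pos hv] at this
    omega
  · left; rw [h]

-- preimages under upperChar of uppercase letters are printable non-space non-break chars
theorem letter_preimage (c u : Char) (hu1 : 65 ≤ u.toNat) (hu2 : u.toNat ≤ 90)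
    (h : PySem.Chars.upperChar c = u) :
    PySem.Chars.isspace c = false ∧ (decide (c.toNat = 10) || decide (c.toNat = 13) || decide (c.toNat = 11) ||
      decide (c.toNat = 12) || decide (c.toNat = 28) || decide (c.toNat = 29) ||
      decide (c.toNat = 30) || decide (c.toNat = 133) || decide (c.toNat = 8232) ||
      decide (c.toNat = 8233)) = false := by
  have hb : 33 ≤ c.toNat ∧ c.toNat ≤ 126 := by
    rcases upperChar_toNat c u h with h' | ⟨h1, h2, h3⟩ <;> omega
  constructor
  · unfold PySem.Chars.isspace
    simp only [Bool.or_eq_false_iff, Bool.and_eq_false_iff, decide_eq_false_iff_not]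
    omega
  · simp only [Bool.or_eq_false_iff, decide_eq_false_iff_not]
    omega

-- main deadness lemma, applied to sub = "SELL" and "BUY"
theorem no_occurrence (text : String) (sub : List Char)
    (hU : ∀ c u, u ∈ sub → PySem.Chars.upperChar c = u →
        PySem.Chars.isspace c = false ∧ (decide (c.toNat = 10) || decide (c.toNat = 13) || decide (c.toNat = 11) ||
      decide (c.toNat = 12) || decide (c.toNat = 28) || decide (c.toNat = 29) ||
      decide (c.toNat = 30) || decide (c.toNat = 133) || decide (c.toNat = 8232) ||
      decide (c.toNat = 8233)) = false)
    (hS : ∀ c ∈ sub, PySem.Chars.isspace c = false)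
    (hne : sub ≠ [])
    (hlines : ∀ line ∈ PySem.Str.splitlines text,
        PySem.Str.isIn (String.ofList sub) (PySem.Str.strip (PySem.Str.upper line)) = false) :
    ¬ sub <:+: (PySem.Str.upper text).toList := by
  intro h
  rw [PySem.Str.toList_upper, PySem.Chars.upper] at h
  rcases infix_map_rev _ _ _ h with ⟨u, hu, hmap⟩
  have huprops : ∀ c ∈ u, PySem.Chars.isspace c = false ∧ (decide (c.toNat = 10) || decide (c.toNat = 13) || decide (c.toNat = 11) ||
      decide (c.toNat = 12) || decide (c.toNat = 28) || decide (c.toNat = 29) ||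
      decide (c.toNat = 30) || decide (c.toNat = 133) || decide (c.toNat = 8232) ||
      decide (c.toNat = 8233)) = false := by
    intro c hc
    have : PySem.Chars.upperChar c ∈ sub := hmap ▸ List.mem_map_of_mem hc
    exact hU c (PySem.Chars.upperChar c) this rfl
  have hune : u ≠ [] := by
    intro he
    rw [he] at hmap
    exact hne hmap.symm
  rcases infix_splitlines u text.toList (fun c hc => (huprops c hc).2) hune hu with ⟨lineC, hlmem, hlinf⟩
  have hline : String.ofList lineC ∈ PySem.Str.splitlines text := by
    rw [PySem.Str.splitlines]
    exact List.mem_map_of_mem hlmem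
  have hfalse := hlines (String.ofList lineC) hline
  have hsubinf : sub <:+: PySem.Chars.strip (PySem.Chars.upper lineC) := by
    apply infix_strip sub (PySem.Chars.upper lineC) hS (fun he => hne he)
    rw [← hmap, PySem.Chars.upper]
    exact List.IsInfix.map _ hlinf
  rw [PySem.Str.isIn_eq, PySem.Str.toList_strip, PySem.Str.toList_upper, String.toList_ofList,
    String.toList_ofList] at hfalse
  exact (PySem.Chars.isIn_eq_false_iff _ _).mp hfalse hsubinf

theorem no_occ_lit (text : String) (sub : String)
    (hU : ∀ c u, u ∈ sub.toList → PySem.Chars.upperChar c = u →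
        PySem.Chars.isspace c = false ∧ (decide (c.toNat = 10) || decide (c.toNat = 13) || decide (c.toNat = 11) ||
      decide (c.toNat = 12) || decide (c.toNat = 28) || decide (c.toNat = 29) ||
      decide (c.toNat = 30) || decide (c.toNat = 133) || decide (c.toNat = 8232) ||
      decide (c.toNat = 8233)) = false)
    (hS : ∀ c ∈ sub.toList, PySem.Chars.isspace c = false) (hne : sub.toList ≠ [])
    (hlines : ∀ line ∈ PySem.Str.splitlines text,
        PySem.Str.isIn sub (PySem.Str.strip (PySem.Str.upper line)) = false) :
    PySem.Str.count (PySem.Str.upper text) sub = 0 := by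
  rw [PySem.Str.count_eq]
  apply count_eq_zero _ _ hne
  apply no_occurrence text sub.toList hU hS hne
  intro line hm
  rw [String.ofList_toList]
  exact hlines line hm

-- ===== VERDICT (by name: the statement is the Claim_ definition above) =====
set_option maxRecDepth 8192 in
theorem extract_signal_spec : Claim_equal_extract_signal := by
  unfold Claim_equal_extract_signal
  intro text rp _
  unfold Spec_extract_signal extract_signal
  have halt : extract_signal_alt text rp =
      (if lastMatch "SELL" ((PySem.Str.splitlines text).map (fun s => PySem.Str.strip (PySem.Str.upper s))) = -1 ∧
          lastMatch "BUY" ((PySem.Str.splitlines text).map (fun s => PySem.Str.strip (PySem.Str.upper s))) = -1 then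
        (if rp == "risk-averse" then "SELL" else "BUY")
      else if lastMatch "SELL" ((PySem.Str.splitlines text).map (fun s => PySem.Str.strip (PySem.Str.upper s))) ≥
              lastMatch "BUY" ((PySem.Str.splitlines text).map (fun s => PySem.Str.strip (PySem.Str.upper s)))
           then "SELL" else "BUY") := rfl
  rw [halt]
  have he := aScan_eq (PySem.Str.splitlines text)
  cases hA : aScan (PySem.Str.splitlines text).reverse with
  | some s =>
    rw [hA] at he
    by_cases hz : lastMatch "SELL" ((PySem.Str.splitlines text).map (fun s => PySem.Str.strip (PySem.Str.upper s))) = -1 ∧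
        lastMatch "BUY" ((PySem.Str.splitlines text).map (fun s => PySem.Str.strip (PySem.Str.upper s))) = -1
    · rw [if_pos hz] at he
      simp at he
    · rw [if_neg hz] at he
      rw [if_neg hz]
      exact Option.some.inj he
  | none =>
    rw [hA] at he
    by_cases hz : lastMatch "SELL" ((PySem.Str.splitlines text).map (fun s => PySem.Str.strip (PySem.Str.upper s))) = -1 ∧
        lastMatch "BUY" ((PySem.Str.splitlines text).map (fun s => PySem.Str.strip (PySem.Str.upper s))) = -1
    · rw [if_pos hz]
      have hlS : ∀ line ∈ PySem.Str.splitlines text,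
          PySem.Str.isIn "SELL" (PySem.Str.strip (PySem.Str.upper line)) = false := by
        intro line hm
        exact lastMatch_eq_neg_one _ _ hz.1 _ (List.mem_map_of_mem hm)
      have hlB : ∀ line ∈ PySem.Str.splitlines text,
          PySem.Str.isIn "BUY" (PySem.Str.strip (PySem.Str.upper line)) = false := by
        intro line hm
        exact lastMatch_eq_neg_one _ _ hz.2 _ (List.mem_map_of_mem hm)
      have hU : ∀ (sub : String), (∀ u ∈ sub.toList, 65 ≤ u.toNat ∧ u.toNat ≤ 90) →
          ∀ c u, u ∈ sub.toList → PySem.Chars.upperChar c = u →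
          PySem.Chars.isspace c = false ∧ (decide (c.toNat = 10) || decide (c.toNat = 13) || decide (c.toNat = 11) ||
        decide (c.toNat = 12) || decide (c.toNat = 28) || decide (c.toNat = 29) ||
        decide (c.toNat = 30) || decide (c.toNat = 133) || decide (c.toNat = 8232) ||
        decide (c.toNat = 8233)) = false := by
        intro sub hrange c u hu hc
        exact letter_preimage c u (hrange u hu).1 (hrange u hu).2 hc
      have htS : ("SELL" : String).toList = ['S','E','L','L'] := by simp
      have htB : ("BUY" : String).toList = ['B','U','Y'] := by simp
      have hcS : PySem.Str.count (PySem.Str.upper text) "SELL" = 0 :=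
        no_occ_lit text "SELL"
          (hU "SELL" (by rw [htS]; intro u hu; fin_cases hu <;>
            exact ⟨Nat.le_of_ble_eq_true rfl, Nat.le_of_ble_eq_true rfl⟩))
          (by rw [htS]; intro c hc; fin_cases hc <;> rfl)
          (by rw [htS]; exact List.cons_ne_nil _ _) hlS
      have hcB : PySem.Str.count (PySem.Str.upper text) "BUY" = 0 :=
        no_occ_lit text "BUY"
          (hU "BUY" (by rw [htB]; intro u hu; fin_cases hu <;>
            exact ⟨Nat.le_of_ble_eq_true rfl, Nat.le_of_ble_eq_true rfl⟩))
          (by rw [htB]; intro c hc; fin_cases hc <;> rfl)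
          (by rw [htB]; exact List.cons_ne_nil _ _) hlB
      simp only [hcS, hcB, ne_eq, not_true_eq_false, if_false]
    · rw [if_neg hz] at he
      simp at he
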